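-- pv_equiv track=rewrite | github.com/jm4ch4do/m4ch4do_myCWs | 5kyu/double_cola_line.py | double_cola_line
-- ===== SOURCE A (Python) =====
-- def double_cola_line(_persons, _turn):
--     """
--     (_list_of_string, int) -> string
--     :param _persons: list with strings having names
--     :param _turn: int with requested turn in the queue
--     :return: string with name taken from _people who corresponds to the requested _turn
--
--     :description:
--     There are _persons in the line for drinking a "double cola". Everyone who drinks gets duplicated and goes
--     to the end of the line. Next an example of a line:
--     ["Sheldon", "Leonard", "Penny"]
--     ["Leonard", "Penny", "Sheldon", "Sheldon"]
--     ["Penny", "Sheldon", "Sheldon", "Leonard", "Leonard"]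
--     The problem aks who is up to in a given _turn
--
--     :examples:
--     (["Sheldon", "Leonard", "Penny", "Rajesh", "Howard"], 1) -> "Sheldon"
--     (["Sheldon", "Leonard", "Penny", "Rajesh", "Howard"], 52) -> "Penny"
--     (["Sheldon", "Leonard", "Penny", "Rajesh", "Howard"], 7230702951) -> "Leonard"
--
--     :algorithm:
--     The explanation uses example two to illustrate the procedure:
--     1. Count amount of _persons
--         (amount = drinkers = 5)
--     2. Find round where the turn takes place
--         round = 1, multiplier = 1, drinkers = 5, accumulated = 5
--         round = 2, multiplier = 2, drinkers = 10, accumulated = 15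
--         round = 3, multiplier = 4, drinkers = 20, accumulated = 35
--         round = 4, multiplier = 8, drinkers = 40 accumulated = 75 which is higher than _turn = 52
--         So _turn happens in round = 4
--     3. Find person who drinks at _turn in selected round
--         For round = 4 there are accumulated = 35, so there are left remaining_turns = 52 - 35 = 17
--             remaining_turns//multiplier = 17//8 = 2
--             + 1 if 17%8 != 0
--             So the result is 3
--             This means the person who drank in _turn is _persons[3-1] = "Penny"
--             17//8 = 2 + ceil(17%8)
--
--     """
--     # 1. Count amount of _persons
--     amount = len(_persons)
--
--     # 2. Find round where the turn takes place
--
--     # set-up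
--     accumulated = 0
--     round = 1
--     multiplier = 1
--     drinkers = amount
--
--     # increase round until accumulated surpassed _turn
--     while True:
--         previous_acc = accumulated  # previous accumulated
--         accumulated += drinkers
--         if accumulated >= _turn:
--             break
--
--         round += 1
--         multiplier *= 2
--         drinkers = amount * multiplier
--
--     # 3. Find person who drinks at _turn in selected round
--     remaining_turns = _turn - previous_acc
--     select = remaining_turns // multiplier
--     select += 1 if remaining_turns % multiplier != 0 else 0
--
--     return _persons[select - 1]
-- ===== SOURCE B (Python) =====
-- def double_cola_line(_persons, _turn):
--     n = len(_persons)
--     t = _turn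
--     while t > n:
--         t = (t - n + 1) // 2
--     return _persons[t - 1]
-- ===== Notes on version B (the rewrite author's own statement) =====
-- stated objective: simpler
-- what changed: Replaces A's forward doubling loop over (accumulated, round, multiplier, drinkers) plus a ceil-division postcomputation by a 3-line top-down reduction: repeatedly map the turn to its parent turn t = (t - n + 1)//2 until it falls inside the first round, then index directly.
import Mathlib
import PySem

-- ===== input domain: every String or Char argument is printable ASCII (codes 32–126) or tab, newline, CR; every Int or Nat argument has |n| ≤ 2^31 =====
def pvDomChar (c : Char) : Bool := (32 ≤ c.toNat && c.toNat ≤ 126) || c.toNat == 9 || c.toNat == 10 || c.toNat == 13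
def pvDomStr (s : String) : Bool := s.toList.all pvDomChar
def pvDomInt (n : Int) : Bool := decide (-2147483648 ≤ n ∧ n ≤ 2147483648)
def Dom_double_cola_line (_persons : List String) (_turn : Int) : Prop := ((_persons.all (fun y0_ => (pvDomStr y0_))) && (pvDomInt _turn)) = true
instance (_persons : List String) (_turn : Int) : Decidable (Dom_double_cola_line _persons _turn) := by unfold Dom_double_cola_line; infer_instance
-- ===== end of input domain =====

-- B replaces A's forward doubling loop (accumulated/round/multiplier/drinkers) and its
-- ceil-division post-step by a 3-line top-down reduction t ← (t - n + 1) // 2; objective: simpler.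
-- Equivalence is about the RETURN value; neither program mutates its arguments.

-- ===== PORT A =====
-- A's 'while True' loop; fuel only makes the recursion total (inside Pre_ it never runs out).
-- state: (acc, round, mult, drinkers); returns (previous_acc, multiplier) at the break.
def pvLoopA (turn n : Int) : Nat → Int → Int → Int → Int → Int × Int
  | 0, acc, _round, mult, _drinkers => (acc, mult)
  | fuel+1, acc, round, mult, drinkers =>
      let prev := acc
      let acc' := acc + drinkers
      if acc' ≥ turn then (prev, mult)
      else pvLoopA turn n fuel acc' (round + 1) (mult * 2) (n * (mult * 2))

def double_cola_line (_persons : List String) (_turn : Int) : String :=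
  let amount : Int := _persons.length
  let pm := pvLoopA _turn amount (_turn.toNat + 1) 0 1 1 amount
  let remaining := _turn - pm.1
  let select := PySem.Int.floordiv remaining pm.2 +
      (if PySem.Int.mod remaining pm.2 ≠ 0 then 1 else 0)
  (PySem.List.pyGet? _persons (select - 1)).getD ""

-- ===== PORT B =====
-- B's 'while t > n: t = (t - n + 1) // 2'; fuel only makes the recursion total.
def pvLoopB (n : Int) : Nat → Int → Int
  | 0, t => t
  | fuel+1, t => if t > n then pvLoopB n fuel (PySem.Int.floordiv (t - n + 1) 2) else t

def double_cola_line_alt (_persons : List String) (_turn : Int) : String :=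
  let n : Int := _persons.length
  let t := pvLoopB n (_turn.toNat + 1) _turn
  (PySem.List.pyGet? _persons (t - 1)).getD ""

-- ===== PRECONDITION & SPEC =====
-- Pre_ excludes exactly the inputs where A raises or loops forever: the empty list
-- (IndexError for _turn ≤ 0, infinite loop otherwise) and _turn < 1 - len(_persons)
-- (IndexError from the final negative index); B raises at exactly the same inputs.
def Pre_double_cola_line (_persons : List String) (_turn : Int) : Prop :=
  _persons ≠ [] ∧ 1 - (_persons.length : Int) ≤ _turn
instance (_persons : List String) (_turn : Int) : Decidable (Pre_double_cola_line _persons _turn) := by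
  unfold Pre_double_cola_line; infer_instance
def pvWitness_double_cola_line : List String × Int := (["Sheldon", "Leonard", "Penny"], 5)

def Spec_double_cola_line (_persons : List String) (_turn : Int) (out : String) : Prop := out = double_cola_line_alt _persons _turn
instance (_persons : List String) (_turn : Int) (out : String) : Decidable (Spec_double_cola_line _persons _turn out) := by unfold Spec_double_cola_line; infer_instance

-- ===== CLAIM (what is proved, stated in full; the proofs are below) =====
def Claim_equal_double_cola_line : Prop := ∀ (_persons : List String) (_turn : Int), Dom_double_cola_line _persons _turn → Pre_double_cola_line _persons _turn → Spec_double_cola_line _persons _turn (double_cola_line _persons _turn)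

-- ===== LEMMAS AND PROOFS =====

theorem one_le_two_pow_int (k : Nat) : (1 : Int) ≤ 2 ^ k :=
  one_le_pow₀ (by norm_num)

-- A's loop, run from a state in round characterised by k, stops at (acc + n·mult·(2^k-1), mult·2^k).
theorem loopA_run (turn n : Int) (hn : 1 ≤ n) :
    ∀ (k fuel : Nat) (acc round mult drinkers : Int), 1 ≤ mult → drinkers = n * mult →
      k < fuel →
      acc + n * mult * (2 ^ k - 1) < turn → turn ≤ acc + n * mult * (2 ^ (k+1) - 1) →
      pvLoopA turn n fuel acc round mult drinkers = (acc + n * mult * (2 ^ k - 1), mult * 2 ^ k) := by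
  intro k
  induction k with
  | zero =>
    intro fuel acc round mult drinkers hm hd hf hlo hhi
    obtain ⟨f, rfl⟩ : ∃ f, fuel = f + 1 := ⟨fuel - 1, by omega⟩
    have hstop : acc + drinkers ≥ turn := by
      have : n * mult * (2 ^ (0+1) - 1) = n * mult := by ring
      rw [this] at hhi; omega
    simp only [pvLoopA, hstop, if_pos, Prod.mk.injEq]
    constructor <;> ring
  | succ k ih =>
    intro fuel acc round mult drinkers hm hd hf hlo hhi
    obtain ⟨f, rfl⟩ : ∃ f, fuel = f + 1 := ⟨fuel - 1, by omega⟩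
    have hP : (1 : Int) ≤ 2 ^ k := one_le_two_pow_int k
    have hnm : (1 : Int) ≤ n * mult := one_le_mul_of_one_le_of_one_le hn hm
    have hcont : ¬ (acc + drinkers ≥ turn) := by
      have h1 : n * mult ≤ n * mult * (2 ^ (k+1) - 1) := by
        have : (1 : Int) ≤ 2 ^ (k+1) - 1 := by
          have := one_le_two_pow_int (k+1)
          have : (2:Int) ≤ 2 ^ (k+1) := by
            calc (2:Int) = 2 ^ 1 := by norm_num
            _ ≤ 2 ^ (k+1) := pow_le_pow_right₀ (by norm_num) (by omega)
          omega
        nlinarith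
      omega
    simp only [pvLoopA, if_neg hcont]
    have := ih f (acc + drinkers) (round + 1) (mult * 2) (n * (mult * 2))
      (by nlinarith) rfl (by omega)
      (by rw [hd]; have : acc + n * mult + n * (mult * 2) * (2 ^ k - 1)
              = acc + n * mult * (2 ^ (k+1) - 1) := by ring
          omega)
      (by rw [hd]; have : acc + n * mult + n * (mult * 2) * (2 ^ (k+1) - 1)
              = acc + n * mult * (2 ^ (k+1+1) - 1) := by ring
          omega)
    rw [this, Prod.mk.injEq]
    subst hd
    constructor <;> ring

-- B's loop on a turn in round k returns the ceiling ⌈s / 2^k⌉ of the offset s into the round.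
theorem loopB_run (n : Int) (hn : 1 ≤ n) :
    ∀ (k fuel : Nat) (t : Int), k < fuel →
      n * (2 ^ k - 1) < t → t ≤ n * (2 ^ (k+1) - 1) →
      pvLoopB n fuel t = (t - n * (2 ^ k - 1) + 2 ^ k - 1) / 2 ^ k := by
  intro k
  induction k with
  | zero =>
    intro fuel t hf hlo hhi
    obtain ⟨f, rfl⟩ : ∃ f, fuel = f + 1 := ⟨fuel - 1, by omega⟩
    have hle : ¬ (t > n) := by
      have : n * (2 ^ (0+1) - 1) = n := by ring
      omega
    simp only [pvLoopB, if_neg hle]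
    simp
  | succ k ih =>
    intro fuel t hf hlo hhi
    obtain ⟨f, rfl⟩ : ∃ f, fuel = f + 1 := ⟨fuel - 1, by omega⟩
    have hP : (1 : Int) ≤ 2 ^ k := one_le_two_pow_int k
    have hgt : t > n := by
      have h1 : n ≤ n * (2 ^ (k+1) - 1) := by
        have h2 : (2:Int) ≤ 2 ^ (k+1) := by
          calc (2:Int) = 2 ^ 1 := by norm_num
          _ ≤ 2 ^ (k+1) := pow_le_pow_right₀ (by norm_num) (by omega)
        nlinarith
      omega
    simp only [pvLoopB, if_pos hgt]
    rw [PySem.Int.floordiv_eq_ediv_of_pos (by norm_num)]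
    -- offset into round k+1
    set s : Int := t - n * (2 ^ (k+1) - 1) with hs
    have hs1 : 1 ≤ s := by omega
    have hs2 : s ≤ n * 2 ^ (k+1) := by
      have : n * (2 ^ (k+1) - 1) + n * 2 ^ (k+1) = n * (2 ^ (k+1+1) - 1) := by ring
      omega
    -- (t - n + 1) / 2 = n*(2^k - 1) + (s+1)/2
    have hcc : n * (2 ^ (k+1) - 1) = 2 * (n * (2 ^ k - 1)) + n := by
      rw [pow_succ]; ring
    have hrw : t - n + 1 = (s + 1) + 2 * (n * (2 ^ k - 1)) := by omega
    have hdiv : (t - n + 1) / 2 = (s + 1) / 2 + n * (2 ^ k - 1) := by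
      rw [hrw, mul_comm (2:Int), Int.add_mul_ediv_right _ _ (by norm_num)]
    set u : Int := (s + 1) / 2 with hu
    have hu1 : 1 ≤ u := by omega
    have hu2 : u ≤ n * 2 ^ k := by
      have : n * 2 ^ (k+1) = 2 * (n * 2 ^ k) := by rw [pow_succ]; ring
      omega
    have hb1 : n * (2 ^ k - 1) < (t - n + 1) / 2 := by rw [hdiv]; omega
    have hb2 : (t - n + 1) / 2 ≤ n * (2 ^ (k+1) - 1) := by
      rw [hdiv]
      have : n * (2 ^ k - 1) + n * 2 ^ k = n * (2 ^ (k+1) - 1) := by ring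
      omega
    rw [ih f _ (by omega) hb1 hb2, hdiv]
    -- ⌈u / 2^k⌉ = ⌈s / 2^(k+1)⌉
    have lhs_eq : (s + 1) / 2 + n * (2 ^ k - 1) - n * (2 ^ k - 1) + 2 ^ k - 1
        = (s + 1) / 2 + (2 ^ k - 1) := by ring
    rw [lhs_eq]
    have hmid : ((s + 1) / 2 + (2 ^ k - 1)) = (s + 2 ^ (k+1) - 1) / 2 := by
      have h2 : s + 2 ^ (k+1) - 1 = (s + 1) + 2 * (2 ^ k - 1) := by
        have : (2:Int) ^ (k+1) = 2 * 2 ^ k := by rw [pow_succ]; ring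
        omega
      rw [h2, mul_comm (2:Int), Int.add_mul_ediv_right _ _ (by norm_num)]
    rw [hmid]
    have hcomp : (s + 2 ^ (k+1) - 1) / 2 / 2 ^ k = (s + 2 ^ (k+1) - 1) / (2 * 2 ^ k) :=
      Int.ediv_ediv_of_nonneg (by norm_num)
    rw [hcomp]
    congr 1
    rw [pow_succ]; ring

-- A's '//' + ceiling correction equals the single ceiling division (s + m - 1) / m.
theorem select_eq_ceil (s m : Int) (hm : 1 ≤ m) :
    PySem.Int.floordiv s m + (if PySem.Int.mod s m ≠ 0 then 1 else 0) = (s + m - 1) / m := by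
  rw [PySem.Int.floordiv_eq_ediv_of_pos (by omega), PySem.Int.mod_eq_emod_of_pos (by omega)]
  have hme := Int.mul_ediv_add_emod s m
  have hr0 : 0 ≤ s % m := Int.emod_nonneg s (by omega)
  have hrm : s % m < m := Int.emod_lt_of_pos s (by omega)
  have key : ∀ a q : Int, 0 ≤ a → a < m → (a + q * m) / m = q := by
    intro a q h0 h1
    rw [Int.add_mul_ediv_right _ _ (by omega : m ≠ 0), Int.ediv_eq_zero_of_lt h0 h1, zero_add]
  by_cases h : s % m = 0
  · have h1 : s + m - 1 = (m - 1) + (s / m) * m := by linarith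
    rw [h1, key _ _ (by omega) (by omega)]
    simp [h]
  · have h1 : s + m - 1 = (s % m - 1) + (s / m + 1) * m := by linarith
    rw [h1, key _ _ (by omega) (by omega)]
    simp [h]

-- every positive turn lies in exactly one round
theorem exists_round (n t : Int) (hn : 1 ≤ n) (ht : 1 ≤ t) :
    ∃ k : Nat, n * (2 ^ k - 1) < t ∧ t ≤ n * (2 ^ (k+1) - 1) := by
  have hex : ∃ k : Nat, t ≤ n * (2 ^ (k+1) - 1) := by
    refine ⟨t.toNat, ?_⟩
    have h1 : (t.toNat : Int) + 1 < 2 ^ (t.toNat + 1) := by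
      exact_mod_cast Nat.lt_two_pow_self (n := t.toNat + 1)
    have h2 : t ≤ 2 ^ (t.toNat + 1) - 1 := by omega
    calc t ≤ 2 ^ (t.toNat + 1) - 1 := h2
    _ ≤ n * (2 ^ (t.toNat + 1) - 1) := le_mul_of_one_le_left (by omega) hn
  refine ⟨Nat.find hex, ?_, Nat.find_spec hex⟩
  rcases Nat.eq_zero_or_pos (Nat.find hex) with h | h
  · rw [h]; norm_num; omega
  · have hmin := Nat.find_min hex (m := Nat.find hex - 1) (by omega)
    have hkk : Nat.find hex - 1 + 1 = Nat.find hex := by omega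
    rw [hkk] at hmin
    omega

-- ===== VERDICT (by name: the statement is the Claim_ definition above) =====
theorem double_cola_line_spec : Claim_equal_double_cola_line := by
  intro persons turn _hdom hpre
  obtain ⟨hne, hlow⟩ := hpre
  have hn : 1 ≤ (persons.length : Int) := by
    have : persons.length ≠ 0 := fun h => hne (List.length_eq_zero_iff.mp h)
    omega
  unfold Spec_double_cola_line
  simp only [double_cola_line, double_cola_line_alt]
  set n : Int := (persons.length : Int) with hN
  by_cases ht : 1 ≤ turn
  · obtain ⟨k, hlo, hhi⟩ := exists_round n turn hn ht
    have hP : (1:Int) ≤ 2 ^ k := one_le_two_pow_int k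
    have hkf : k < turn.toNat + 1 := by
      have hk2 : (k:Int) + 1 ≤ 2 ^ k := by
        have := Nat.lt_two_pow_self (n := k)
        exact_mod_cast this
      have h3 : (2:Int) ^ k - 1 ≤ n * (2 ^ k - 1) := le_mul_of_one_le_left (by omega) hn
      omega
    have hA := loopA_run turn n hn k (turn.toNat + 1) 0 1 1 n le_rfl (by ring) hkf
      (by have h : (0:Int) + n * 1 * (2 ^ k - 1) = n * (2 ^ k - 1) := by ring
          omega)
      (by have h : (0:Int) + n * 1 * (2 ^ (k+1) - 1) = n * (2 ^ (k+1) - 1) := by ring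
          omega)
    have hB := loopB_run n hn k (turn.toNat + 1) turn hkf hlo hhi
    rw [hA, hB]
    have hsel := select_eq_ceil (turn - (0 + n * 1 * (2 ^ k - 1))) (1 * 2 ^ k) (by omega)
    simp only []
    rw [hsel]
    congr 2
    have e1 : (0:Int) + n * 1 * (2 ^ k - 1) = n * (2 ^ k - 1) := by ring
    have e2 : (1:Int) * 2 ^ k = 2 ^ k := by ring
    rw [e1, e2]
  · have htn : turn.toNat = 0 := by omega
    rw [htn]
    have hstop : (0:Int) + n ≥ turn := by omega
    have hle : ¬ (turn > n) := by omega
    simp only [pvLoopA, pvLoopB, hstop, if_pos, if_neg hle]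
    rw [PySem.Int.floordiv_eq_ediv_of_pos (b := 1) (by norm_num),
        PySem.Int.mod_eq_emod_of_pos (b := 1) (by norm_num)]
    simp
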